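-- pv_equiv track=rewrite | github.com/wuningxi/GiBERT | src/preprocessing/Preprocessor.py | restore_tokens
-- ===== SOURCE A (Python) =====
-- def restore_tokens(s):
--     '''
--     Combines subword tokens and ensures alignment by copying them,
--     e.g. [CLS] am ##ro ##zi accused his brother --> [CLS] amrozi amrozi amrozi accused his brother
--     '''
--     i = 0
--     while i < len(s):
--         if s[i].startswith('##'):  # find start of separated token
--             replacement = s[i - 1] + s[i][2:]
--             for j in range(1,len(s[i:])):
--                 if s[i + j].startswith('##'):  # find end
--                     replacement += (s[i + j][2:])
--                 else:
--                     # replace subword tokens with token in s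
--                     for pos in range(-1,j):
--                         s[i + pos] = replacement
--                     i = i+j
--                     break
--         else:
--             i += 1
--     return s
-- ===== SOURCE B (Python) =====
-- def restore_tokens(s):
--     # Single pass: keep the word merged so far and how many positions it must
--     # cover; emit `count` copies whenever a new word begins.  Builds a new list
--     # (A mutates its argument in place; return values agree).
--     out = []
--     word = ''
--     count = 0
--     for tok in s:
--         if tok.startswith('##'):
--             word += tok[2:]
--             count += 1
--         else:
--             out.extend([word] * count)
--             word = tok
--             count = 1
--     out.extend([word] * count)
--     return out
-- ===== Notes on version B (the rewrite author's own statement) =====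
-- stated objective: simpler
-- what changed: Replaces A's while-loop with index arithmetic, an inner rescanning for-loop and in-place back-writes by a single left-to-right pass that keeps the merged word and a copy count and emits the copies when the next group starts.
-- intended difference: On lists whose first token starts with '##', A's s[i-1] wraps around to the last element, so A merges the leading subword run with the LAST token and overwrites the last position too (e.g. on the witness it returns 'ba','ba'); B merges just the run's own pieces and leaves the rest alone (returning 'a','b' there), which is the intended alignment behaviour. — e.g. on restore_tokens(["##a", "b"]): A returns ["ba", "ba"], B returns ["a", "b"]
import Mathlib
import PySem

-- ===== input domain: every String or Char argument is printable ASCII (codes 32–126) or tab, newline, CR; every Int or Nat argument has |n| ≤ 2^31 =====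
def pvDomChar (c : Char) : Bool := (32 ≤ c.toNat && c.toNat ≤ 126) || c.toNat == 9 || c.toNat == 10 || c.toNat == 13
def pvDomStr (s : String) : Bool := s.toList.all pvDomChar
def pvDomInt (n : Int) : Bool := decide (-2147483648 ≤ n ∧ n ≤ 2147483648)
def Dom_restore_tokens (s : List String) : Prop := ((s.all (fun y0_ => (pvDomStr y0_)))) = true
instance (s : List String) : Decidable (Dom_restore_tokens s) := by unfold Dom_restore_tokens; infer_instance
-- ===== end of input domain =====

-- B replaces A's index scanning with in-place back-writes by a single left-to-right pass
-- (pending merged word + copy count); A mutates its argument in place, the equivalence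
-- proved here is about the return value only.

-- ===== PORT A =====
-- the inner 'for j in range(1, len(s[i:]))' loop: accumulates `replacement`; on break it
-- performs 'for pos in range(-1, j): s[i+pos] = replacement' and returns (s, i+j);
-- k counts the iterations the for-loop still has (jmax - j for jmax = len(s) - i);
-- returns none when the for-loop ends without break (Python then loops forever).
def restoreInner (s : List String) (i : Nat) (repl : String) (j : Nat) (k : Nat) :
    Option (List String × Nat) :=
  match k with
  | 0 => none
  | k + 1 =>
    let t := PySem.List.pyGetD s ((i : Int) + (j : Int)) ""
    if PySem.Str.startswith t "##" then
      restoreInner s i (repl ++ PySem.Str.slice t (some 2) none) (j + 1) k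
    else
      some ((PySem.List.pyRange (-1) (j : Int) 1).foldl
        (fun acc pos => PySem.List.pySetD acc ((i : Int) + pos) repl) s, i + j)

-- the 'while i < len(s)' loop; fuel only guards the case where Python's loop never
-- terminates (a '##' run reaching the end of the list), which Pre_ excludes.
def restoreGo (s : List String) (i : Nat) (fuel : Nat) : List String :=
  match fuel with
  | 0 => s
  | fuel + 1 =>
    if i < s.length then
      let ti := PySem.List.pyGetD s (i : Int) ""
      if PySem.Str.startswith ti "##" then
        let repl := PySem.List.pyGetD s ((i : Int) - 1) "" ++ PySem.Str.slice ti (some 2) none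
        match restoreInner s i repl 1 (s.length - i - 1) with
        | some (s', i') => restoreGo s' i' fuel
        | none => s
      else restoreGo s (i + 1) fuel
    else s

def restore_tokens (s : List String) : List String := restoreGo s 0 (s.length + 1)

-- ===== PORT B =====
def restoreStep (acc : List String × String × Nat) (tok : String) : List String × String × Nat :=
  let (out, word, count) := acc
  if PySem.Str.startswith tok "##" then
    (out, word ++ PySem.Str.slice tok (some 2) none, count + 1)
  else
    (out ++ List.replicate count word, tok, 1)

def restore_tokens_alt (s : List String) : List String :=
  let r := s.foldl restoreStep ([], "", 0)
  r.1 ++ List.replicate r.2.2 r.2.1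

-- ===== PRECONDITION & SPEC =====
-- Pre_ excludes lists whose LAST token starts with '##': there A's inner for-loop finds
-- no end of the subword run, i is never advanced and the while loop runs forever.
def Pre_restore_tokens (s : List String) : Prop :=
  ∀ t ∈ s.getLast?, PySem.Str.startswith t "##" = false
instance (s : List String) : Decidable (Pre_restore_tokens s) := by
  unfold Pre_restore_tokens; infer_instance
def pvWitness_restore_tokens : List String := ["[CLS]", "am", "##ro", "##zi", "accused"]

-- On lists whose FIRST token starts with '##' A's 's[i-1]' wraps around to the LAST
-- element: A merges the leading subword run with the last token and overwrites the last
-- position too, while B merges just the run's own pieces and leaves the last token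
-- alone, which is the intended alignment behaviour.
def D_restore_tokens (s : List String) : Prop :=
  (s.head?.any (fun t => PySem.Str.startswith t "##")) = true
instance (s : List String) : Decidable (D_restore_tokens s) := by
  unfold D_restore_tokens; infer_instance

def Spec_restore_tokens (s : List String) (out : List String) : Prop :=
  ¬ D_restore_tokens s → out = restore_tokens_alt s
instance (s : List String) (out : List String) : Decidable (Spec_restore_tokens s out) := by
  unfold Spec_restore_tokens; infer_instance

def pvDiffWitness_restore_tokens : List String := ["##a", "b"]
def pvDiffWitnessOut_restore_tokens : (List String) × (List String) := (["ba", "ba"], ["a", "b"])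

-- ===== CLAIM (what is proved, stated in full; the proofs are below) =====
def Claim_unchanged_restore_tokens : Prop :=
  ∀ (s : List String), Dom_restore_tokens s → Pre_restore_tokens s →
    Spec_restore_tokens s (restore_tokens s)
def Claim_changed_restore_tokens : Prop :=
  Dom_restore_tokens (pvDiffWitness_restore_tokens) ∧
  Pre_restore_tokens (pvDiffWitness_restore_tokens) ∧
  D_restore_tokens (pvDiffWitness_restore_tokens) ∧
  restore_tokens (pvDiffWitness_restore_tokens) = pvDiffWitnessOut_restore_tokens.1 ∧
  restore_tokens_alt (pvDiffWitness_restore_tokens) = pvDiffWitnessOut_restore_tokens.2 ∧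
  pvDiffWitnessOut_restore_tokens.1 ≠ pvDiffWitnessOut_restore_tokens.2

-- ===== LEMMAS AND PROOFS =====

-- B's pass, written as structural recursion on the list (pending word + copy count).
def bGo : List String → String → Nat → List String
  | [], word, count => List.replicate count word
  | t :: rest, word, count =>
    if PySem.Str.startswith t "##" then
      bGo rest (word ++ PySem.Str.slice t (some 2) none) (count + 1)
    else
      List.replicate count word ++ bGo rest t 1

theorem bGo_cons_pos (t : String) (rest : List String) (w : String) (c : Nat)
    (h : PySem.Str.startswith t "##" = true) :
    bGo (t :: rest) w c = bGo rest (w ++ PySem.Str.slice t (some 2) none) (c + 1) := by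
  simp only [bGo, h, if_true]

theorem bGo_cons_neg (t : String) (rest : List String) (w : String) (c : Nat)
    (h : PySem.Str.startswith t "##" = false) :
    bGo (t :: rest) w c = List.replicate c w ++ bGo rest t 1 := by
  simp only [bGo, h, Bool.false_eq_true, if_false]

theorem bGo_foldl (l : List String) : ∀ out word count,
    (let r := l.foldl restoreStep (out, word, count)
     r.1 ++ List.replicate r.2.2 r.2.1) = out ++ bGo l word count := by
  induction l with
  | nil => intro out word count; simp [bGo]
  | cons t rest ih =>
    intro out word count
    by_cases h : PySem.Str.startswith t "##" = true
    · simp only [List.foldl_cons, restoreStep, h, if_true, bGo, ih]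
    · simp only [List.foldl_cons, restoreStep, h, if_false, Bool.false_eq_true, bGo, ih,
        List.append_assoc]

theorem alt_eq_bGo (s : List String) : restore_tokens_alt s = bGo s "" 0 := by
  have := bGo_foldl s [] "" 0
  simpa [restore_tokens_alt] using this

-- the back-write loop 'for pos in range(-1, j): s[i+pos] = replacement'
theorem setRun (j : Nat) : ∀ (s : List String) (i : Nat) (v : String), 1 ≤ i → i + j ≤ s.length →
    (PySem.List.pyRange (-1) (j : Int) 1).foldl
      (fun acc pos => PySem.List.pySetD acc ((i : Int) + pos) v) s
    = s.take (i - 1) ++ List.replicate (j + 1) v ++ s.drop (i + j) := by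
  induction j with
  | zero =>
    intro s i v hi hlen
    have hr : PySem.List.pyRange (-1) (((0:Nat)) : Int) 1 = [-1] := by decide
    rw [hr]
    simp only [List.foldl_cons, List.foldl_nil]
    rw [PySem.List.pySetD_of_nonneg _ _ (by omega)]
    have ht : ((i : Int) + -1).toNat = i - 1 := by omega
    rw [ht, List.set_eq_take_cons_drop _ (by omega)]
    have h1 : i - 1 + 1 = i + 0 := by omega
    rw [h1]
    simp
  | succ j ih =>
    intro s i v hi hlen
    have hcast : ((j + 1 : Nat) : Int) = (j : Int) + 1 := by push_cast; ring
    rw [hcast, PySem.List.pyRange_one_succ_right (by omega), List.foldl_append]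
    rw [ih s i v hi (by omega)]
    simp only [List.foldl_cons, List.foldl_nil]
    rw [PySem.List.pySetD_of_nonneg _ _ (by omega)]
    have ht : ((i : Int) + (j : Int)).toNat = i + j := by omega
    rw [ht]
    have hlt : i + j < s.length := by omega
    have hlen2 : (s.take (i-1) ++ List.replicate (j+1) v).length = i + j := by
      simp [List.length_take]; omega
    rw [List.set_append, if_neg (by rw [hlen2]; omega), hlen2, Nat.sub_self,
      List.drop_eq_getElem_cons hlt, List.set_cons_zero]
    rw [show i + (j+1) = (i+j) + 1 by omega]
    simp [List.replicate_succ', List.append_assoc]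

theorem innerSpec (n : Nat) : ∀ (s : List String) (i j : Nat) (repl : String),
    n = s.length - (i + j) → 1 ≤ i → 1 ≤ j → i + j ≤ s.length →
    PySem.Str.startswith (s.getD (i + j - 1) "") "##" = true →
    Pre_restore_tokens s →
    ∃ q R, j ≤ q ∧ i + q < s.length ∧
      PySem.Str.startswith (s.getD (i + q) "") "##" = false ∧
      restoreInner s i repl j (s.length - (i + j))
        = some (s.take (i - 1) ++ List.replicate (q + 1) R ++ s.drop (i + q), i + q) ∧
      bGo (s.drop (i + j)) repl (j + 1)
        = List.replicate (q + 1) R ++ bGo (s.drop (i + q + 1)) (s.getD (i + q) "") 1 := by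
  induction n with
  | zero =>
    intro s i j repl hn hi hj hij hstar hpre
    -- i + j = s.length, so s's last element starts with '##', contradicting Pre_
    exfalso
    have hij' : i + j = s.length := by omega
    have hlast : s.getLast? = some (s.getD (i + j - 1) "") := by
      rw [List.getLast?_eq_getElem?, show i + j - 1 = s.length - 1 by omega,
        List.getD_eq_getElem _ _ (by omega), List.getElem?_eq_getElem (by omega)]
    have := hpre _ (by rw [hlast]; rfl)
    rw [this] at hstar
    exact Bool.false_ne_true hstar
  | succ n ih =>
    intro s i j repl hn hi hj hij hstar hpre
    have hlt : i + j < s.length := by omega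
    have hcast : (i : Int) + (j : Int) = ((i + j : Nat) : Int) := by push_cast; ring
    have ht : PySem.List.pyGetD s ((i : Int) + (j : Int)) "" = s.getD (i + j) "" := by
      rw [hcast, PySem.List.pyGetD_natCast]
    have hdrop : s.drop (i + j) = s.getD (i + j) "" :: s.drop (i + j + 1) := by
      rw [List.getD_eq_getElem _ _ hlt]
      exact List.drop_eq_getElem_cons hlt
    by_cases hs : PySem.Str.startswith (s.getD (i + j) "") "##" = true
    · obtain ⟨q, R, hq, hql, hqn, heq, hbgo⟩ :=
        ih s i (j + 1) (repl ++ PySem.Str.slice (s.getD (i + j) "") (some 2) none)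
          (by omega) hi (by omega) (by omega) (by simpa using hs) hpre
      rw [show s.length - (i + (j + 1)) = n by omega] at heq
      refine ⟨q, R, by omega, hql, hqn, ?_, ?_⟩
      · rw [show s.length - (i + j) = n + 1 by omega]
        unfold restoreInner
        simp only [ht, hs, if_true]
        exact heq
      · rw [hdrop, bGo_cons_pos _ _ _ _ hs,
          show i + j + 1 = i + (j + 1) by omega]
        exact hbgo
    · have hs' : PySem.Str.startswith (s.getD (i + j) "") "##" = false := by simpa using hs
      refine ⟨j, repl, le_refl j, hlt, hs', ?_, ?_⟩
      · rw [show s.length - (i + j) = n + 1 by omega]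
        unfold restoreInner
        simp only [ht, hs', Bool.false_eq_true, if_false]
        rw [setRun j s i repl hi hij]
      · rw [hdrop, bGo_cons_neg _ _ _ _ hs']

theorem outerLemma (fuel : Nat) : ∀ (s : List String) (i : Nat),
    1 ≤ i → i ≤ s.length → Pre_restore_tokens s → s.length - i + 1 ≤ fuel →
    restoreGo s i fuel = s.take (i - 1) ++ bGo (s.drop i) (s.getD (i - 1) "") 1 := by
  induction fuel with
  | zero => intro s i _ _ _ hf; omega
  | succ fuel ih =>
    intro s i hi hile hpre hf
    by_cases hlt : i < s.length
    case neg =>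
      -- i = s.length: the while loop ends; bGo on [] gives back the last element
      have hie : i = s.length := by omega
      have hne : s ≠ [] := by intro h; subst h; simp at hie; omega
      rw [restoreGo, if_neg hlt, hie, List.drop_length]
      show s = s.take (s.length - 1) ++ bGo [] (s.getD (s.length - 1) "") 1
      rw [bGo, List.replicate_one, List.getD_eq_getElem _ _ (by
        have := List.length_pos_iff.mpr hne; omega),
        ← List.getLast_eq_getElem hne, List.take_append_getLast]
    case pos =>
      have hti : PySem.List.pyGetD s (i : Int) "" = s.getD i "" := PySem.List.pyGetD_natCast s i ""
      have hdropi : s.drop i = s.getD i "" :: s.drop (i + 1) := by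
        rw [List.getD_eq_getElem _ _ hlt]; exact List.drop_eq_getElem_cons hlt
      by_cases hs : PySem.Str.startswith (s.getD i "") "##" = true
      case neg =>
        have hs' : PySem.Str.startswith (s.getD i "") "##" = false := by simpa using hs
        rw [restoreGo, if_pos hlt]
        simp only [hti, hs', Bool.false_eq_true, if_false]
        rw [ih s (i + 1) (by omega) (by omega) hpre (by omega)]
        have htki : s.take i = s.take (i - 1) ++ [s.getD (i - 1) ""] := by
          conv_lhs => rw [show i = (i - 1) + 1 by omega]
          rw [List.take_succ_eq_append_getElem (by omega : i - 1 < s.length),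
            List.getD_eq_getElem _ _ (by omega)]
        rw [hdropi, bGo_cons_neg _ _ _ _ hs', List.replicate_one,
          show i + 1 - 1 = i by omega, htki]
        simp [List.append_assoc]
      case pos =>
        obtain ⟨q, R, hq, hql, hqn, heq, hbgo⟩ :=
          innerSpec (s.length - (i + 1)) s i 1
            (s.getD (i - 1) "" ++ PySem.Str.slice (s.getD i "") (some 2) none)
            rfl hi (by omega) (by omega) (by simpa using hs) hpre
        rw [restoreGo, if_pos hlt]
        simp only [hti, hs, if_true]
        rw [show s.length - i - 1 = s.length - (i + 1) by omega] at *
        have hprev : PySem.List.pyGetD s ((i : Int) - 1) "" = s.getD (i - 1) "" := by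
          rw [show (i : Int) - 1 = ((i - 1 : Nat) : Int) by omega, PySem.List.pyGetD_natCast]
        rw [hprev, heq]
        -- the updated list is P ++ R :: drop (i+q) s with P = take (i-1) s ++ replicate q R
        set P : List String := s.take (i - 1) ++ List.replicate q R with hP
        have hsplit : s.take (i - 1) ++ List.replicate (q + 1) R ++ s.drop (i + q)
            = P ++ (R :: s.drop (i + q)) := by
          rw [hP, List.replicate_succ']
          simp [List.append_assoc]
        have hPlen : P.length = i + q - 1 := by
          rw [hP]; simp [List.length_take]; omega
        rw [hsplit]
        have hdropne : s.drop (i + q) ≠ [] := by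
          simp only [ne_eq, List.drop_eq_nil_iff]
          omega
        have hpre' : Pre_restore_tokens (P ++ (R :: s.drop (i + q))) := by
          intro t htl
          rw [show P ++ (R :: s.drop (i + q)) = (P ++ [R]) ++ s.drop (i + q) by
              simp [List.append_assoc],
            List.getLast?_append_of_ne_nil _ hdropne] at htl
          have hlast_eq : (s.drop (i + q)).getLast? = s.getLast? := by
            conv_rhs => rw [← List.take_append_drop (i + q) s]
            rw [List.getLast?_append_of_ne_nil _ hdropne]
          rw [hlast_eq] at htl
          exact hpre t htl
        have hred : (match some (P ++ (R :: s.drop (i + q)), i + q) with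
            | some (s', i') => restoreGo s' i' fuel
            | none => s) = restoreGo (P ++ (R :: s.drop (i + q))) (i + q) fuel := rfl
        rw [hred, ih (P ++ (R :: s.drop (i + q))) (i + q) (by omega)
          (by simp [hPlen]; omega) hpre' (by simp [hPlen]; omega)]
        -- simplify take / getD / drop of the updated list
        have htake : (P ++ (R :: s.drop (i + q))).take (i + q - 1) = P := by
          rw [← hPlen, List.take_left]
        have hgd : (P ++ (R :: s.drop (i + q))).getD (i + q - 1) "" = R := by
          rw [List.getD_eq_getElem?_getD, ← hPlen, List.getElem?_append_right (le_refl _)]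
          simp
        have hdr : (P ++ (R :: s.drop (i + q))).drop (i + q) = s.drop (i + q) := by
          set X := s.drop (i + q) with hX
          rw [show P ++ (R :: X) = (P ++ [R]) ++ X by simp [List.append_assoc],
            show i + q = (P ++ [R]).length by simp [hPlen]; omega, List.drop_left]
        rw [htake, hgd, hdr]
        rw [hdropi, bGo_cons_pos _ _ _ _ hs, show (1 : Nat) + 1 = 2 by rfl] at *
        rw [hbgo]
        have hdq2 : s.drop (i + q) = s.getD (i + q) "" :: s.drop (i + q + 1) := by
          rw [List.getD_eq_getElem _ _ hql]; exact List.drop_eq_getElem_cons hql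
        rw [hdq2, bGo_cons_neg _ _ _ _ hqn, List.replicate_one, hP,
          List.replicate_succ']
        simp [List.append_assoc]

-- ===== VERDICT (by name: the statement is the Claim_ definition above) =====
theorem restore_tokens_spec : Claim_unchanged_restore_tokens := by
  intro s _hdom hpre
  unfold Spec_restore_tokens
  intro hnd
  rw [alt_eq_bGo]
  cases s with
  | nil => rfl
  | cons t0 rest =>
    have ht0 : PySem.Str.startswith t0 "##" = false := by
      simp only [D_restore_tokens, List.head?_cons, Option.any_some] at hnd
      simpa using hnd
    rw [restore_tokens, restoreGo, if_pos (by simp)]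
    have hti : PySem.List.pyGetD (t0 :: rest) ((0 : Nat) : Int) "" = t0 := by
      rw [PySem.List.pyGetD_natCast]; rfl
    simp only [Int.natCast_zero] at hti
    rw [outerLemma ((t0 :: rest).length) (t0 :: rest) 1 (by omega) (by simp) hpre (by simp),
      show bGo (t0 :: rest) "" 0 = bGo rest t0 1 by
        rw [bGo_cons_neg _ _ _ _ ht0]; simp]
    simp [(show PySem.Chars.startswith t0.toList ['#','#'] = false by simpa using ht0)]

theorem restore_tokens_changed : Claim_changed_restore_tokens := by
  unfold Claim_changed_restore_tokens; decide
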